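-- pv_equiv track=rewrite | github.com/DangerousVegetable/QuiverHomologies | Sage/generate.py | label_stabilizer
-- ===== SOURCE A (Python) =====
-- import itertools
--
-- def label_stabilizer(labels):
--     n = len(labels)
--     factors = (
--         itertools.permutations(block)
--         for (_, block) in itertools.groupby(range(n), key=lambda i: labels[i])
--     )
--     for subperms in itertools.product(*factors):
--         yield [i for subperm in subperms for i in subperm]
-- ===== SOURCE B (Python) =====
-- def label_stabilizer(labels):
--     pairs = list(enumerate(labels))
--
--     def dfs(avail, rest, acc):
--         # avail: unused indices of the current equal-label run, in order
--         if avail: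
--             for j in range(len(avail)):
--                 yield from dfs(avail[:j] + avail[j + 1:], rest, acc + [avail[j]])
--         elif not rest:
--             yield acc
--         else:
--             k = rest[0][1]
--             block = []
--             while rest and rest[0][1] == k:
--                 block.append(rest[0][0])
--                 rest = rest[1:]
--             yield from dfs(block, rest, acc)
--
--     yield from dfs([], pairs, [])
-- ===== Notes on version B (the rewrite author's own statement) =====
-- stated objective: alternative
-- what changed: Replaces itertools.groupby + itertools.permutations + itertools.product with a single recursive backtracking DFS that picks one unused index of the current equal-label run at a time and peels the next run off the remaining (index,label) pairs when the run is exhausted.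
import Mathlib
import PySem

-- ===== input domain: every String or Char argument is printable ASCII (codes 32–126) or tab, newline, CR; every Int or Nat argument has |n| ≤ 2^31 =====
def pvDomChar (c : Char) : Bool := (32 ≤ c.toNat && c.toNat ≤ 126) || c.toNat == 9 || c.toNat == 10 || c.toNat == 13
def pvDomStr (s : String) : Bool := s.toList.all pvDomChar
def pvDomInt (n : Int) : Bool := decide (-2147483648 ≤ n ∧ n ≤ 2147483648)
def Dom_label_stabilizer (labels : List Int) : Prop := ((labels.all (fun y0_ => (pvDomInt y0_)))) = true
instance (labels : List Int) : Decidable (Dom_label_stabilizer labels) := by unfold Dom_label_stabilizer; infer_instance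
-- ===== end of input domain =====

-- B replaces itertools.groupby/permutations/product with one recursive backtracking DFS
-- over (index,label) pairs (alternative decomposition, same cost). Both Pythons are
-- generators; the equivalence is about the yielded sequence as a list.


-- ===== PORT A =====
-- helper for itertools.permutations and for B's choice loop:
-- the ways to pick one element (in index order) with the remainder kept in order
def selections : List Int → List (Int × List Int)
  | [] => []
  | x :: xs => (x, xs) :: (selections xs).map (fun p => (p.1, x :: p.2))

-- termination fact (cited by the decreasing_by of perms and dfs)
theorem selections_length {l : List Int} {p : Int × List Int}
    (h : p ∈ selections l) : p.2.length + 1 = l.length := by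
  induction l generalizing p with
  | nil => simp [selections] at h
  | cons x xs ih =>
    simp only [selections, List.mem_cons, List.mem_map] at h
    rcases h with h | ⟨q, hq, rfl⟩
    · subst h; simp
    · have := ih hq; simp [this]

-- itertools.permutations in itertools' order: pick each element in index order as head
def perms : List Int → List (List Int)
  | [] => [[]]
  | x :: xs =>
    (selections (x :: xs)).attach.flatMap
      (fun q => (perms q.1.2).map (fun rest => q.1.1 :: rest))
termination_by l => l.length
decreasing_by
  have := selections_length q.2
  simp at this ⊢
  omega

-- one groupby step: start a new group or extend the first group of the accumulator,
-- depending on whether the next pair's label matches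
def grpStep (i l : Int) (rest : List (Int × Int)) (acc : List (List Int)) : List (List Int) :=
  match rest, acc with
  | (_, m) :: _, g :: gs => if l = m then (i :: g) :: gs else [i] :: g :: gs
  | _, _ => [[i]]

-- itertools.groupby(range(n), key=lambda i: labels[i]) ported over the (index, labels[index])
-- pairs (= enumerate labels, which is exactly the key computation A performs); exact because
-- permutations(block) materializes each block before groupby advances.
def grpA : List (Int × Int) → List (List Int)
  | [] => []
  | (i, l) :: rest => grpStep i l rest (grpA rest)

-- itertools.product over the per-block permutation lists (leftmost factor varies slowest)
def prodL : List (List (List Int)) → List (List (List Int))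
  | [] => [[]]
  | f :: fs => f.flatMap (fun x => (prodL fs).map (fun rest => x :: rest))

-- [i for subperm in subperms for i in subperm] = sub.flatMap id
def label_stabilizer (labels : List Int) : List (List Int) :=
  (prodL ((grpA (PySem.List.enumerate labels 0)).map perms)).map (fun sub => sub.flatMap id)

-- ===== PORT B =====
-- the while loop of Source B: peel the leading run of pairs whose label equals k
def splitRun (k : Int) : List (Int × Int) → List Int × List (Int × Int)
  | [] => ([], [])
  | (i, l) :: r =>
    if l = k then
      let s := splitRun k r
      (i :: s.1, s.2)
    else ([], (i, l) :: r)

-- termination fact for dfs (cited by its decreasing_by)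
theorem splitRun_snd_le (k : Int) (ps : List (Int × Int)) :
    (splitRun k ps).2.length ≤ ps.length := by
  induction ps with
  | nil => simp [splitRun]
  | cons p r ih =>
    obtain ⟨i, l⟩ := p
    simp only [splitRun]
    split
    · simpa using Nat.le_succ_of_le ih
    · simp

-- the recursive backtracking generator of Source B: choose one unused index of the current
-- run (the for-loop over avail = selections), or peel the next run when avail is empty
def dfs (avail : List Int) (rest : List (Int × Int)) (acc : List Int) : List (List Int) :=
  match avail, rest with
  | a :: as, rs =>
    (selections (a :: as)).attach.flatMap
      (fun q => dfs q.1.2 rs (acc ++ [q.1.1]))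
  | [], [] => [acc]
  | [], (i, l) :: r =>
    let s := splitRun l ((i, l) :: r)
    dfs s.1 s.2 acc
termination_by (rest.length, avail.length)
decreasing_by
  · have := selections_length q.2
    apply Prod.Lex.right
    simp at this ⊢
    omega
  · apply Prod.Lex.left
    have := splitRun_snd_le l r
    simp only [splitRun]
    simp
    omega

def label_stabilizer_alt (labels : List Int) : List (List Int) :=
  dfs [] (PySem.List.enumerate labels 0) []

-- ===== PRECONDITION & SPEC =====
def Spec_label_stabilizer (labels : List Int) (out : List (List Int)) : Prop := out = label_stabilizer_alt labels
instance (labels : List Int) (out : List (List Int)) : Decidable (Spec_label_stabilizer labels out) := by unfold Spec_label_stabilizer; infer_instance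

-- ===== CLAIM (what is proved, stated in full; the proofs are below) =====
def Claim_equal_label_stabilizer : Prop := ∀ (labels : List Int), Dom_label_stabilizer labels → Spec_label_stabilizer labels (label_stabilizer labels)

-- ===== LEMMAS AND PROOFS =====

-- the common specification: per-block permutations, later blocks varying fastest
def specBlocks : List (List Int) → List (List Int)
  | [] => [[]]
  | b :: bs => (perms b).flatMap (fun p => (specBlocks bs).map (fun c => p ++ c))

theorem prodL_spec (gs : List (List Int)) :
    (prodL (gs.map perms)).map (fun sub => sub.flatMap id) = specBlocks gs := by
  induction gs with
  | nil => simp [prodL, specBlocks]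
  | cons b bs ih =>
    simp only [List.map_cons, prodL, specBlocks, ← ih]
    simp [List.map_flatMap, List.map_map, Function.comp_def]

theorem grpA_splitRun (rest : List (Int × Int)) : ∀ (j m : Int),
    grpA ((j, m) :: rest) =
      (splitRun m ((j, m) :: rest)).1 :: grpA (splitRun m ((j, m) :: rest)).2 := by
  induction rest with
  | nil => intro j m; simp [grpA, grpStep, splitRun]
  | cons q rest' ih =>
    obtain ⟨j2, m2⟩ := q
    intro j m
    by_cases h2 : m2 = m
    · subst h2
      rw [show grpA ((j, m2) :: (j2, m2) :: rest') =
            grpStep j m2 ((j2, m2) :: rest') (grpA ((j2, m2) :: rest')) from rfl,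
          ih j2 m2]
      simp [grpStep, splitRun]
    · rw [show grpA ((j, m) :: (j2, m2) :: rest') =
            grpStep j m ((j2, m2) :: rest') (grpA ((j2, m2) :: rest')) from rfl,
          ih j2 m2]
      simp [grpStep, splitRun, h2, Ne.symm h2]
      rw [ih j2 m2]
      simp [splitRun]

theorem dfs_spec (avail : List Int) (rest : List (Int × Int)) (acc : List Int) :
    dfs avail rest acc =
      (perms avail).flatMap
        (fun p => (specBlocks (grpA rest)).map (fun c => acc ++ p ++ c)) := by
  induction avail, rest, acc using dfs.induct with
  | case1 a as rs acc ih =>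
    rw [dfs, perms]
    rw [List.flatMap_congr (fun q _ => ih q)]
    simp [List.flatMap_assoc, List.flatMap_map, List.append_assoc]
  | case2 acc => simp [dfs, perms, grpA, specBlocks]
  | case3 acc i l r s ih =>
    rw [dfs]
    show dfs (splitRun l ((i, l) :: r)).1 (splitRun l ((i, l) :: r)).2 acc = _
    rw [ih, grpA_splitRun r i l]
    simp only [perms, specBlocks, List.map_flatMap, List.append_assoc,
      List.flatMap_singleton, List.map_map, Function.comp_def, List.nil_append]
    rfl

-- ===== VERDICT (by name: the statement is the Claim_ definition above) =====
theorem label_stabilizer_spec : Claim_equal_label_stabilizer := by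
  intro labels _
  unfold Spec_label_stabilizer label_stabilizer label_stabilizer_alt
  rw [prodL_spec, dfs_spec]
  simp [perms]
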